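-- pv_equiv track=rewrite | github.com/Snail110/leercode | 华为机试/森林中兔子.py | tuzi_num
-- ===== SOURCE A (Python) =====
-- def tuzi_num(nums:list):
--     d = dict()
--     for i in range(len(nums)):
--         if nums[i] not in d:
--             d[nums[i]] = 1
--         else:
--             d[nums[i]] += 1
--
--     res = 0
--     for j in d.keys():
--         a = d[j]//2
--         b = d[j]%2
--
--         res += 2 * j * a + b * (j + 1)
--     return res
-- ===== SOURCE B (Python) =====
-- def tuzi_num(nums: list):
--     # One pass, no counting dict: keep the set of values seen an odd number
--     # of times; each occurrence contributes (j+1) when it opens a pair and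
--     # (j-1) when it closes one (2*j for the pair minus the j+1 already added).
--     odd = set()
--     res = 0
--     for j in nums:
--         if j in odd:
--             odd.discard(j)
--             res += j - 1
--         else:
--             odd.add(j)
--             res += j + 1
--     return res
-- ===== Notes on version B (the rewrite author's own statement) =====
-- stated objective: simpler
-- what changed: Replaced A's two-phase dict-count-then-sum-over-keys with a single pass that keeps only the set of values seen an odd number of times and adds each element's incremental contribution (j+1 opening a pair, j-1 closing it).
import Mathlib
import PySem

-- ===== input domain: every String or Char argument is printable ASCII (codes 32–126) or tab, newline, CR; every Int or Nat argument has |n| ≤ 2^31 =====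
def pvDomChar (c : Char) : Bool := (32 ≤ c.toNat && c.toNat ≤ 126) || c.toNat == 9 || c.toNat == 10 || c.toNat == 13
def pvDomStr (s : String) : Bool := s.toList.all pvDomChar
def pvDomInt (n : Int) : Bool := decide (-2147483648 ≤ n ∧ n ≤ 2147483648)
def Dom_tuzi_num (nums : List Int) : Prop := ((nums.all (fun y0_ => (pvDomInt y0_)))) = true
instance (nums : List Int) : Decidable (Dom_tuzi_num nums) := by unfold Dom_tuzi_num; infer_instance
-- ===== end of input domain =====

-- B replaces A's dict-count-then-sum with a single pass over nums maintaining a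
-- parity set and a running total (objective: simpler).

-- ===== PORT A =====
def tuzi_num (nums : List Int) : Int :=
  let d := (PySem.List.pyRange 0 (nums.length : Int) 1).foldl (fun d i =>
      let x := PySem.List.pyGetD nums i 0
      if d.contains x = false then d.insert x 1
      else d.insert x (d.getD x 0 + 1)) PySem.Dict.empty
  d.keys.foldl (fun res j =>
      let a := PySem.Int.floordiv (d.getD j 0) 2
      let b := PySem.Int.mod (d.getD j 0) 2
      res + (2 * j * a + b * (j + 1))) 0

-- ===== PORT B =====
def tuziStep (st : PySem.Set Int × Int) (j : Int) : PySem.Set Int × Int :=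
  if PySem.Set.contains st.1 j then (PySem.Set.discard st.1 j, st.2 + (j - 1))
  else (PySem.Set.add st.1 j, st.2 + (j + 1))

def tuzi_num_alt (nums : List Int) : Int :=
  (nums.foldl tuziStep (PySem.Set.empty, 0)).2

-- ===== PRECONDITION & SPEC =====
def Spec_tuzi_num (nums : List Int) (out : Int) : Prop := out = tuzi_num_alt nums
instance (nums : List Int) (out : Int) : Decidable (Spec_tuzi_num nums out) := by unfold Spec_tuzi_num; infer_instance

-- ===== CLAIM (what is proved, stated in full; the proofs are below) =====
def Claim_equal_tuzi_num : Prop := ∀ (nums : List Int), Dom_tuzi_num nums → Spec_tuzi_num nums (tuzi_num nums)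

-- ===== LEMMAS AND PROOFS =====

-- per-value contribution A sums: tuziG c j for value j occurring c times
def tuziG (c : Nat) (j : Int) : Int :=
  2 * j * PySem.Int.floordiv (c : Int) 2 + PySem.Int.mod (c : Int) 2 * (j + 1)

lemma tuziG_nat (c : Nat) (j : Int) :
    tuziG c j = 2 * j * ((c / 2 : Nat) : Int) + ((c % 2 : Nat) : Int) * (j + 1) := by
  unfold tuziG
  rw [show (2:Int) = ((2:Nat):Int) from rfl, PySem.Int.floordiv_natCast, PySem.Int.mod_natCast]

lemma tuziG_succ_odd (c : Nat) (j : Int) (h : c % 2 = 1) :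
    tuziG (c + 1) j = tuziG c j + (j - 1) := by
  obtain ⟨m, rfl⟩ : ∃ m, c = 2 * m + 1 := ⟨c / 2, by omega⟩
  rw [tuziG_nat, tuziG_nat,
    show (2 * m + 1 + 1) / 2 = m + 1 by omega, show (2 * m + 1) / 2 = m by omega,
    show (2 * m + 1 + 1) % 2 = 0 by omega, show (2 * m + 1) % 2 = 1 by omega]
  push_cast; ring

lemma tuziG_succ_even (c : Nat) (j : Int) (h : c % 2 = 0) :
    tuziG (c + 1) j = tuziG c j + (j + 1) := by
  obtain ⟨m, rfl⟩ : ∃ m, c = 2 * m := ⟨c / 2, by omega⟩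
  rw [tuziG_nat, tuziG_nat,
    show (2 * m + 1) / 2 = m by omega, show (2 * m) / 2 = m by omega,
    show (2 * m + 1) % 2 = 1 by omega, show (2 * m) % 2 = 0 by omega]
  push_cast; ring

-- A's counting loop builds exactly Counter(nums)
lemma tuzi_counter (nums : List Int) :
    ((PySem.List.pyRange 0 (nums.length : Int) 1).foldl (fun d i =>
      let x := PySem.List.pyGetD nums i 0
      if d.contains x = false then d.insert x 1
      else d.insert x (d.getD x 0 + 1)) PySem.Dict.empty)
    = PySem.Dict.counter nums := by
  have hfun : (fun (d : PySem.Dict Int Int) (x : Int) =>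
      if d.contains x = false then d.insert x 1 else d.insert x (d.getD x 0 + 1))
      = fun d x => d.insert x (d.getD x 0 + 1) := by
    funext d x
    by_cases h : d.contains x = true
    · simp [h]
    · have h' : d.contains x = false := by simpa using h
      rw [if_pos h', PySem.Dict.getD_of_not_contains d 0 h']
      norm_num
  calc ((PySem.List.pyRange 0 (nums.length : Int) 1).foldl (fun d i =>
          let x := PySem.List.pyGetD nums i 0
          if d.contains x = false then d.insert x 1
          else d.insert x (d.getD x 0 + 1)) PySem.Dict.empty)
      = nums.foldl (fun (d : PySem.Dict Int Int) (x : Int) =>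
          if d.contains x = false then d.insert x 1
          else d.insert x (d.getD x 0 + 1)) PySem.Dict.empty :=
        PySem.List.foldl_pyRange_zero_pyGetD' nums 0
          (fun (d : PySem.Dict Int Int) (x : Int) => if d.contains x = false then d.insert x 1
            else d.insert x (d.getD x 0 + 1)) PySem.Dict.empty
    _ = nums.foldl (fun (d : PySem.Dict Int Int) (x : Int) =>
          d.insert x (d.getD x 0 + 1)) PySem.Dict.empty := by rw [hfun]
    _ = PySem.Dict.counter nums :=
        PySem.Dict.foldl_insert_getD_add_one_eq_counter nums

-- A's value is the sum of tuziG over the distinct values of nums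
lemma tuzi_num_eq_sum (nums : List Int) :
    tuzi_num nums = ((PySem.Set.ofList nums).map (fun j => tuziG (nums.count j) j)).sum := by
  unfold tuzi_num
  simp only [tuzi_counter]
  calc (PySem.Dict.counter nums).keys.foldl (fun res j =>
          let a := PySem.Int.floordiv ((PySem.Dict.counter nums).getD j 0) 2
          let b := PySem.Int.mod ((PySem.Dict.counter nums).getD j 0) 2
          res + (2 * j * a + b * (j + 1))) 0
      = 0 + ((PySem.Dict.counter nums).keys.map (fun j =>
          2 * j * PySem.Int.floordiv ((PySem.Dict.counter nums).getD j 0) 2 +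
          PySem.Int.mod ((PySem.Dict.counter nums).getD j 0) 2 * (j + 1))).sum :=
        PySem.List.foldl_add (PySem.Dict.counter nums).keys (fun j =>
          2 * j * PySem.Int.floordiv ((PySem.Dict.counter nums).getD j 0) 2 +
          PySem.Int.mod ((PySem.Dict.counter nums).getD j 0) 2 * (j + 1)) 0
    _ = ((PySem.Set.ofList nums).map (fun j => tuziG (nums.count j) j)).sum := by
        rw [PySem.Dict.keys_counter]
        simp only [PySem.Dict.getD_counter, zero_add]
        rfl

-- one-point update of a sum over a Nodup list
lemma sum_map_update {L : List Int} (f f' : Int → Int) (x : Int)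
    (hnd : L.Nodup) (hx : x ∈ L) (h : ∀ j ∈ L, j ≠ x → f j = f' j) :
    (L.map f).sum = (L.map f').sum + (f x - f' x) := by
  induction L with
  | nil => cases hx
  | cons a L ih =>
    rcases List.mem_cons.mp hx with rfl | hx'
    · have hall : ∀ j ∈ L, f j = f' j := by
        intro j hj
        exact h j (List.mem_cons_of_mem _ hj) (by rintro rfl; exact (List.nodup_cons.mp hnd).1 hj)
      simp only [List.map_cons, List.sum_cons]
      rw [List.map_congr_left hall]; ring
    · have ha : a ≠ x := by rintro rfl; exact (List.nodup_cons.mp hnd).1 hx'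
      simp only [List.map_cons, List.sum_cons]
      rw [ih (List.nodup_cons.mp hnd).2 hx'
        (fun j hj hne => h j (List.mem_cons_of_mem _ hj) hne), h a (by simp) ha]
      ring

-- B's loop invariant: the set holds exactly the odd-count values, the total is A's sum
lemma tuzi_alt_invariant (nums : List Int) :
    (nums.foldl tuziStep (PySem.Set.empty, 0)).1.Nodup ∧
    (∀ x, x ∈ (nums.foldl tuziStep (PySem.Set.empty, 0)).1 ↔ nums.count x % 2 = 1) ∧
    (nums.foldl tuziStep (PySem.Set.empty, 0)).2
      = ((PySem.Set.ofList nums).map (fun j => tuziG (nums.count j) j)).sum := by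
  induction nums using List.reverseRecOn with
  | nil => simp [PySem.Set.empty, PySem.Set.ofList]
  | append_singleton l x ih =>
    obtain ⟨hnd, hmem, hval⟩ := ih
    rw [List.foldl_append]
    set S := (l.foldl tuziStep (PySem.Set.empty, 0)).1 with hS
    set R := (l.foldl tuziStep (PySem.Set.empty, 0)).2 with hR
    have hfold : l.foldl tuziStep (PySem.Set.empty, 0) = (S, R) := rfl
    rw [hfold]
    by_cases hc : PySem.Set.contains S x = true
    · have hxS : x ∈ S := by rw [← PySem.Set.contains_iff]; exact hc
      have hodd : l.count x % 2 = 1 := (hmem x).mp hxS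
      have hxl : x ∈ l := by
        by_contra hnl
        simp [List.count_eq_zero_of_not_mem hnl] at hodd
      have hstep : List.foldl tuziStep (S, R) [x] = (PySem.Set.discard S x, R + (x - 1)) := by
        show tuziStep (S, R) x = _
        unfold tuziStep
        rw [if_pos (show PySem.Set.contains (S, R).1 x = true from hc)]
      rw [hstep]
      refine ⟨PySem.Set.nodup_discard S x hnd, ?_, ?_⟩
      · intro y
        show y ∈ PySem.Set.discard S x ↔ _
        rw [PySem.Set.mem_discard]
        by_cases hyx : y = x
        · subst hyx
          have hcy : (l ++ [y]).count y = l.count y + 1 := by simp [List.count_append]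
          rw [hcy]
          constructor
          · rintro ⟨-, hne⟩; exact absurd rfl hne
          · intro h; exact absurd h (by omega)
        · have hcy : (l ++ [x]).count y = l.count y := by
            simp [List.count_append, (Ne.symm hyx : x ≠ y)]
          rw [hcy, hmem y]
          simp [hyx]
      · show R + (x - 1) = _
        rw [hval, PySem.Set.ofList_append_singleton,
          PySem.Set.add_of_mem ((PySem.Set.mem_ofList l x).mpr hxl)]
        rw [sum_map_update (fun j => tuziG ((l ++ [x]).count j) j)
          (fun j => tuziG (l.count j) j) x (PySem.Set.nodup_ofList l)
          ((PySem.Set.mem_ofList l x).mpr hxl)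
          (by
            intro j _ hj
            simp [List.count_append, (Ne.symm hj : x ≠ j)])]
        have hcx : (l ++ [x]).count x = l.count x + 1 := by
          simp [List.count_append]
        rw [hcx, tuziG_succ_odd _ _ hodd]
        ring
    · have hxS : x ∉ S := fun h => hc ((PySem.Set.contains_iff S x).mpr h)
      have heven : l.count x % 2 = 0 := by
        have h2 : ¬ l.count x % 2 = 1 := fun h => hxS ((hmem x).mpr h)
        omega
      have hc' : PySem.Set.contains S x = false := by
        cases h : PySem.Set.contains S x
        · rfl
        · exact absurd h hc
      have hstep : List.foldl tuziStep (S, R) [x] = (PySem.Set.add S x, R + (x + 1)) := by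
        show tuziStep (S, R) x = _
        unfold tuziStep
        rw [if_neg (show ¬ PySem.Set.contains (S, R).1 x = true from hc)]
      rw [hstep]
      refine ⟨PySem.Set.nodup_add S x hnd, ?_, ?_⟩
      · intro y
        show y ∈ PySem.Set.add S x ↔ _
        rw [PySem.Set.mem_add]
        by_cases hyx : y = x
        · subst hyx
          have hcy : (l ++ [y]).count y = l.count y + 1 := by simp [List.count_append]
          rw [hcy]
          constructor
          · intro _; omega
          · intro _; exact Or.inr rfl
        · have hcy : (l ++ [x]).count y = l.count y := by
            simp [List.count_append, (Ne.symm hyx : x ≠ y)]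
          rw [hcy, hmem y]
          simp [hyx]
      · show R + (x + 1) = _
        rw [hval]
        by_cases hxl : x ∈ l
        · rw [PySem.Set.ofList_append_singleton,
            PySem.Set.add_of_mem ((PySem.Set.mem_ofList l x).mpr hxl)]
          rw [sum_map_update (fun j => tuziG ((l ++ [x]).count j) j)
            (fun j => tuziG (l.count j) j) x (PySem.Set.nodup_ofList l)
            ((PySem.Set.mem_ofList l x).mpr hxl)
            (by
              intro j _ hj
              simp [List.count_append, (Ne.symm hj : x ≠ j)])]
          have hcx : (l ++ [x]).count x = l.count x + 1 := by
            simp [List.count_append]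
          rw [hcx, tuziG_succ_even _ _ heven]
          ring
        · rw [PySem.Set.ofList_append_singleton,
            PySem.Set.add_of_not_mem (fun h => hxl ((PySem.Set.mem_ofList l x).mp h))]
          rw [List.map_append, List.sum_append]
          have hcx : (l ++ [x]).count x = 1 := by
            simp [List.count_append, List.count_eq_zero_of_not_mem hxl]
          have hg1 : tuziG 1 x = x + 1 := by
            rw [tuziG_nat]; norm_num
          simp only [List.map_cons, List.map_nil, List.sum_cons, List.sum_nil, hcx, hg1]
          have hmapeq : ((PySem.Set.ofList l).map (fun j => tuziG ((l ++ [x]).count j) j))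
              = ((PySem.Set.ofList l).map (fun j => tuziG (l.count j) j)) := by
            apply List.map_congr_left
            intro j hj
            have hjx : j ≠ x := fun h => hxl (h ▸ (PySem.Set.mem_ofList l j).mp hj)
            have hcj : (l ++ [x]).count j = l.count j := by
              simp [List.count_append, (Ne.symm hjx : x ≠ j)]
            rw [hcj]
          rw [hmapeq]
          ring

-- ===== VERDICT (by name: the statement is the Claim_ definition above) =====
theorem tuzi_num_spec : Claim_equal_tuzi_num := by
  intro nums _
  show tuzi_num nums = tuzi_num_alt nums
  rw [tuzi_num_eq_sum, tuzi_num_alt, (tuzi_alt_invariant nums).2.2]
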